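-- pv_equiv track=rewrite | github.com/sin00528/Algo | programmers/조이스틱.py | solution
-- ===== SOURCE A (Python) =====
-- def solution(name):
--     # 아스키 코드를 이용하여 상하 이동 최소 횟수를 구함
--     graph = [min(abs(ord(char) - ord('A')), abs(ord('Z') - ord(char)+1)) for char in name]
--     now, answer = 0, 0
--     while True:
--         # 현재 방문노드 처리
--         answer += graph[now]
--         graph[now] = 0
--         # 모든 노드를 방문하였을때 종료
--         if sum(graph) == 0:
--             break
--         # 좌측과 우측을 비교하며 더 짧은 곳으로 이동
--         left, right = 1, 1
--         # 좌측 체크: 현재 문자열을 변경할 필요가 없는 경우 좌측으로 이동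
--         while graph[now - left] == 0:
--             left += 1
--         # 우측 체크: 현재 문자열을 변경할 필요가 없는 경우 우측으로 이동
--         while graph[now + right] == 0:
--             right += 1
--         # 더 작은 값으로 업데이트 후
--         # 이동 거리가 더 짧은 곳으로 인덱스를 이동
--         answer += min(left, right)
--         now +=  -left if left < right else right
--     return answer
-- ===== SOURCE B (Python) =====
-- def solution(name):
--     # Two-pointer sweep over the sorted nonzero positions: the zeroed cells always
--     # form one contiguous (cyclic) window, so nearest-left/right are the arc ends.
--     n = len(name)
--     cost = [min(abs(ord(ch) - 65), abs(91 - ord(ch))) for ch in name]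
--     idx = [p for p in range(1, n) if cost[p] > 0]
--     total = sum(cost)
--     i, j = 0, len(idx) - 1
--     lo = hi = 0
--     at_lo = True
--     moves = 0
--     while i <= j:
--         now = lo if at_lo else hi
--         right = idx[i] - now
--         left = now + n - idx[j]
--         if left < right:
--             moves += left
--             lo = idx[j] - n
--             j -= 1
--             at_lo = True
--         else:
--             moves += right
--             hi = idx[i]
--             i += 1
--             at_lo = False
--     return total + moves
-- ===== Notes on version B (the rewrite author's own statement) =====
-- stated objective: faster
-- what changed: A repeatedly rescans the dense cost array (left scan, right scan and a full sum per visit, O(n^2)); B precomputes the sorted list of nonzero positions once and runs a two-pointer sweep over it, exploiting that the zeroed cells always form one contiguous cyclic window, so each step is O(1).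
import Mathlib
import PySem

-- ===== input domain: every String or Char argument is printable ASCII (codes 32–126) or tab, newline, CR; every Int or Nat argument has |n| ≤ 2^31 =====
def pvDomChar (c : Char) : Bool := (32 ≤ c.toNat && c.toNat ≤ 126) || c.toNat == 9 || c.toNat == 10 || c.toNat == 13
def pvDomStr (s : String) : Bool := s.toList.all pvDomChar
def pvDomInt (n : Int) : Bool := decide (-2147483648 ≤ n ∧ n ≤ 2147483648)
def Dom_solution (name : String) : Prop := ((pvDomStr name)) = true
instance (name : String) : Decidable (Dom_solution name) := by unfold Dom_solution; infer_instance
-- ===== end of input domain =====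

-- B replaces A's repeated dense-array rescans (left scan, right scan and a full sum per
-- visit) by one two-pointer sweep over the precomputed sorted list of nonzero positions:
-- the zeroed cells always form one contiguous cyclic window, so the nearest remaining
-- targets are the ends of that list segment.


-- ===== PORT A =====
-- cost of one character: min(abs(ord(char) - ord('A')), abs(ord('Z') - ord(char) + 1))
def costA (ch : Char) : Int := min |((ch.toNat : Int) - 65)| |(90 : Int) - (ch.toNat : Int) + 1|

def scanLA (graph : List Int) (now left : Int) (fuel : Nat) : Option Int :=
  match fuel with
  | 0 => none
  | f + 1 =>
    match PySem.List.pyGet? graph (now - left) with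
    | none => none
    | some v => if v = 0 then scanLA graph now (left + 1) f else some left

def scanRA (graph : List Int) (now right : Int) (fuel : Nat) : Option Int :=
  match fuel with
  | 0 => none
  | f + 1 =>
    match PySem.List.pyGet? graph (now + right) with
    | none => none
    | some v => if v = 0 then scanRA graph now (right + 1) f else some right

def loopA (graph : List Int) (now answer : Int) (fuel : Nat) : Int :=
  match fuel with
  | 0 => answer
  | f + 1 =>
    match PySem.List.pyGet? graph now with
    | none => answer
    | some v =>
      let answer := answer + v
      let graph := PySem.List.pySetD graph now 0
      if graph.sum = 0 then answer
      else
        match scanLA graph now 1 (2 * graph.length + 2),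
              scanRA graph now 1 (2 * graph.length + 2) with
        | some left, some right =>
          loopA graph (now + (if left < right then -left else right)) (answer + min left right) f
        | _, _ => answer

def solution (name : String) : Int :=
  let graph := name.toList.map costA
  loopA graph 0 0 (graph.length + 1)

-- ===== PORT B =====
def costB (ch : Char) : Int := min |((ch.toNat : Int) - 65)| |(91 : Int) - (ch.toNat : Int)|

def loopB (idx : List Int) (n i j lo hi : Int) (atLo : Bool) (moves : Int) (fuel : Nat) : Int :=
  match fuel with
  | 0 => moves
  | f + 1 =>
    if i ≤ j then
      let now := if atLo then lo else hi
      let rightd := PySem.List.pyGetD idx i 0 - now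
      let leftd := now + n - PySem.List.pyGetD idx j 0
      if leftd < rightd then
        loopB idx n i (j - 1) (PySem.List.pyGetD idx j 0 - n) hi true (moves + leftd) f
      else
        loopB idx n (i + 1) j lo (PySem.List.pyGetD idx i 0) false (moves + rightd) f
    else moves

def solution_alt (name : String) : Int :=
  let cost := name.toList.map costB
  let n : Int := cost.length
  let idx := (PySem.List.pyRange 1 n 1).filter (fun p => 0 < PySem.List.pyGetD cost p 0)
  cost.sum + loopB idx n 0 (idx.length - 1) 0 0 true 0 idx.length


-- ===== PRECONDITION & SPEC =====
-- A indexes graph[0] unconditionally, so it raises IndexError exactly on the empty string.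
def Pre_solution (name : String) : Prop := name ≠ ""
instance (name : String) : Decidable (Pre_solution name) := by unfold Pre_solution; infer_instance

def pvWitness_solution : String := "JEROEN"

def Spec_solution (name : String) (out : Int) : Prop := out = solution_alt name
instance (name : String) (out : Int) : Decidable (Spec_solution name out) := by unfold Spec_solution; infer_instance

-- ===== CLAIM (what is proved, stated in full; the proofs are below) =====
def Claim_equal_solution : Prop := ∀ (name : String), Dom_solution name → Pre_solution name → Spec_solution name (solution name)

-- ===== LEMMAS AND PROOFS =====

def cg (cs : List Int) (p : Int) : Int := cs.getD p.toNat 0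

def maskL (cs : List Int) (lo hi : Int) : List Int :=
  (List.range cs.length).map
    (fun (p : Nat) => if (p : Int) ≤ hi ∨ lo + (cs.length : Int) ≤ (p : Int) then 0 else cg cs (p : Int))

theorem length_maskL (cs : List Int) (lo hi : Int) : (maskL cs lo hi).length = cs.length := by
  simp [maskL]

theorem getElem_maskL (cs : List Int) (lo hi : Int) (p : Nat) (h : p < (maskL cs lo hi).length) :
    (maskL cs lo hi)[p] =
      if (p : Int) ≤ hi ∨ lo + (cs.length : Int) ≤ (p : Int) then 0 else cg cs (p : Int) := by
  simp [maskL]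

theorem cg_getElem (cs : List Int) (p : Nat) (h : p < cs.length) :
    cg cs (p : Int) = cs[p] := by
  simp [cg, List.getElem?_eq_getElem h]

theorem cg_nonneg (cs : List Int) (Hc : ∀ x ∈ cs, 0 ≤ x) (p : Int) : 0 ≤ cg cs p := by
  by_cases h : p.toNat < cs.length
  · rw [cg, List.getD_eq_getElem?_getD, List.getElem?_eq_getElem h]
    exact Hc _ (List.getElem_mem h)
  · rw [cg, List.getD_eq_getElem?_getD, List.getElem?_eq_none (by omega)]
    simp

theorem pyGetD_nonneg_cg (cs : List Int) (p : Int) (h0 : 0 ≤ p) :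
    PySem.List.pyGetD cs p 0 = cg cs p := by
  unfold PySem.List.pyGetD PySem.List.pyGet? PySem.List.pyIdx?
  rw [if_pos h0]
  by_cases h : p < (cs.length : Int)
  · rw [if_pos h]; simp [cg, List.getD_eq_getElem?_getD]
  · rw [if_neg h]
    rw [cg, List.getD_eq_getElem?_getD, List.getElem?_eq_none (by omega)]
    simp

theorem set_eq_self_of (l : List Int) (i : Nat) (v : Int) (h : i < l.length) (hv : l[i] = v) :
    l.set i v = l := by
  apply List.ext_getElem (by simp)
  intro k h1 h2
  rw [List.getElem_set]
  split_ifs with he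
  · subst he; exact hv.symm
  · rfl

theorem pyGet?_cyc (g : List Int) (t : Int) (h1 : -(g.length : Int) ≤ t) (h2 : t < g.length) :
    PySem.List.pyGet? g t = g[(if t < 0 then t + g.length else t).toNat]? := by
  unfold PySem.List.pyGet? PySem.List.pyIdx?
  split_ifs with h3 h4 h5 <;> simp_all <;> try omega
  · congr 1; omega

theorem pySetD_cyc (g : List Int) (t : Int) (v : Int)
    (h1 : -(g.length : Int) ≤ t) (h2 : t < g.length) :
    PySem.List.pySetD g t v = g.set (if t < 0 then t + g.length else t).toNat v := by
  unfold PySem.List.pySetD PySem.List.pySet? PySem.List.pyIdx?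
  split_ifs with h3 h4 h5 <;> simp_all <;> try omega
  · congr 1; omega

theorem scanRA_spec (g : List Int) (now : Int) (R : Int) :
    ∀ (fuel : Nat) (k : Int), 1 ≤ k → k ≤ R →
    (∀ q : Int, k ≤ q → q < R → PySem.List.pyGet? g (now + q) = some 0) →
    (∃ v, PySem.List.pyGet? g (now + R) = some v ∧ v ≠ 0) →
    (R - k).toNat < fuel →
    scanRA g now k fuel = some R := by
  intro fuel
  induction fuel with
  | zero => intro k _ _ _ _ hf; omega
  | succ f ih =>
    intro k hk hkR hmid hend hf
    rcases hend with ⟨v, hv, hvne⟩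
    by_cases heq : k = R
    · subst heq
      simp [scanRA, hv, hvne]
    · have hlt : k < R := lt_of_le_of_ne hkR heq
      have h0 : PySem.List.pyGet? g (now + k) = some 0 := hmid k le_rfl hlt
      simp only [scanRA, h0]
      exact ih (k + 1) (by omega) (by omega) (fun q hq1 hq2 => hmid q (by omega) hq2)
        ⟨v, hv, hvne⟩ (by omega)

theorem scanLA_spec (g : List Int) (now : Int) (L : Int) :
    ∀ (fuel : Nat) (k : Int), 1 ≤ k → k ≤ L →
    (∀ q : Int, k ≤ q → q < L → PySem.List.pyGet? g (now - q) = some 0) →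
    (∃ v, PySem.List.pyGet? g (now - L) = some v ∧ v ≠ 0) →
    (L - k).toNat < fuel →
    scanLA g now k fuel = some L := by
  intro fuel
  induction fuel with
  | zero => intro k _ _ _ _ hf; omega
  | succ f ih =>
    intro k hk hkL hmid hend hf
    rcases hend with ⟨v, hv, hvne⟩
    by_cases heq : k = L
    · subst heq
      simp [scanLA, hv, hvne]
    · have hlt : k < L := lt_of_le_of_ne hkL heq
      have h0 : PySem.List.pyGet? g (now - k) = some 0 := hmid k le_rfl hlt
      simp only [scanLA, h0]
      exact ih (k + 1) (by omega) (by omega) (fun q hq1 hq2 => hmid q (by omega) hq2)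
        ⟨v, hv, hvne⟩ (by omega)

theorem loopB_acc (idx : List Int) (n : Int) :
    ∀ (fuel : Nat) (i j lo hi : Int) (atLo : Bool) (m : Int),
    loopB idx n i j lo hi atLo m fuel = m + loopB idx n i j lo hi atLo 0 fuel := by
  intro fuel
  induction fuel with
  | zero => intro i j lo hi atLo m; simp [loopB]
  | succ f ih =>
    intro i j lo hi atLo m
    simp only [loopB]
    split_ifs <;>
      first
        | ((conv_lhs => rw [ih]); (conv_rhs => rw [ih]); ring)
        | simp

def segSum (cs idx : List Int) (i j : Int) : Int :=
  (((idx.drop i.toNat).take ((j + 1 - i).toNat)).map (cg cs)).sum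

theorem segSum_front (cs idx : List Int) (i j : Int) (h0 : 0 ≤ i) (hij : i ≤ j)
    (hj : j < (idx.length : Int)) :
    segSum cs idx i j = cg cs (idx.getD i.toNat 0) + segSum cs idx (i + 1) j := by
  have hi : i.toNat < idx.length := by omega
  have hdrop : idx.drop i.toNat = idx[i.toNat] :: idx.drop (i.toNat + 1) :=
    (List.getElem_cons_drop hi).symm
  have hm : (j + 1 - i).toNat = (j + 1 - (i + 1)).toNat + 1 := by omega
  have hi1 : (i + 1).toNat = i.toNat + 1 := by omega
  rw [segSum, segSum, hdrop, hm, hi1, List.take_succ_cons, List.map_cons, List.sum_cons,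
    List.getD_eq_getElem?_getD, List.getElem?_eq_getElem hi]
  rfl

theorem segSum_back (cs idx : List Int) (i j : Int) (h0 : 0 ≤ i) (hij : i ≤ j)
    (hj : j < (idx.length : Int)) :
    segSum cs idx i j = segSum cs idx i (j - 1) + cg cs (idx.getD j.toNat 0) := by
  have hjlt : j.toNat < idx.length := by omega
  have hm : (j + 1 - i).toNat = (j - i).toNat + 1 := by omega
  have hdl : (j - i).toNat < (idx.drop i.toNat).length := by
    rw [List.length_drop]; omega
  have hgd : (idx.drop i.toNat)[(j - i).toNat] = idx[j.toNat] := by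
    rw [List.getElem_drop]; congr 1; omega
  have hm2 : (j - 1 + 1 - i).toNat = (j - i).toNat := by omega
  rw [segSum, segSum, hm, hm2, List.take_succ, List.getElem?_eq_getElem hdl, hgd,
    List.getD_eq_getElem?_getD, List.getElem?_eq_getElem hjlt]
  simp

theorem mem_idxL (cs : List Int) (p : Int) :
    p ∈ (PySem.List.pyRange 1 (cs.length : Int) 1).filter
          (fun q => 0 < PySem.List.pyGetD cs q 0) ↔
      1 ≤ p ∧ p < (cs.length : Int) ∧ 0 < cg cs p := by
  rw [List.mem_filter]
  constructor
  · rintro ⟨hmem, hpos⟩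
    have := PySem.List.mem_pyRange_one.mp hmem
    refine ⟨this.1, this.2, ?_⟩
    rw [← pyGetD_nonneg_cg cs p (by omega)]
    simpa using hpos
  · rintro ⟨h1, h2, h3⟩
    refine ⟨PySem.List.mem_pyRange_one.mpr ⟨h1, h2⟩, ?_⟩
    simpa [pyGetD_nonneg_cg cs p (by omega)] using h3

theorem sorted_idxL (cs : List Int) :
    ((PySem.List.pyRange 1 (cs.length : Int) 1).filter
      (fun q => 0 < PySem.List.pyGetD cs q 0)).Pairwise (· < ·) := by
  apply List.Pairwise.filter
  unfold PySem.List.pyRange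
  rw [if_neg (by norm_num)]
  apply List.pairwise_map.mpr
  apply List.Pairwise.imp ?_ (List.pairwise_lt_range)
  intro a b hab
  omega

theorem length_idxL (cs : List Int) (h : cs.length ≠ 0) :
    ((PySem.List.pyRange 1 (cs.length : Int) 1).filter
      (fun q => 0 < PySem.List.pyGetD cs q 0)).length + 1 ≤ cs.length := by
  have h2 : (PySem.List.pyRange 1 (cs.length : Int) 1).length = cs.length - 1 := by
    unfold PySem.List.pyRange
    rw [if_neg (by norm_num)]
    simp only [List.length_map, List.length_range]
    have e : ((cs.length : Int) - 1 + 1 - 1) / 1 = (cs.length : Int) - 1 := by omega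
    rw [e]
    split_ifs <;> omega
  have := List.length_filter_le (fun q => 0 < PySem.List.pyGetD cs q 0)
    (PySem.List.pyRange 1 (cs.length : Int) 1)
  omega

-- nonneg entries of maskL
theorem maskL_nonneg (cs : List Int) (Hc : ∀ x ∈ cs, 0 ≤ x) (lo hi : Int) :
    ∀ x ∈ maskL cs lo hi, 0 ≤ x := by
  intro x hx
  obtain ⟨p, hp, he⟩ := List.mem_iff_getElem.mp hx
  rw [getElem_maskL] at he
  subst he
  split_ifs
  · exact le_refl 0
  · exact cg_nonneg cs Hc _

theorem maskL_sum_zero (cs : List Int) (Hc : ∀ x ∈ cs, 0 ≤ x) (lo hi : Int)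
    (hz : ∀ p : Int, hi < p → p < lo + (cs.length : Int) → cg cs p = 0) :
    (maskL cs lo hi).sum = 0 := by
  apply List.sum_eq_zero
  intro x hx
  obtain ⟨p, hp, he⟩ := List.mem_iff_getElem.mp hx
  rw [getElem_maskL] at he
  subst he
  split_ifs with h
  · rfl
  · exact hz _ (by omega) (by omega)

theorem maskL_sum_ne (cs : List Int) (Hc : ∀ x ∈ cs, 0 ≤ x) (lo hi P : Int)
    (h0 : 0 ≤ P) (h1 : P < (cs.length : Int))
    (hw : ¬((P : Int) ≤ hi ∨ lo + (cs.length : Int) ≤ P)) (hpos : 0 < cg cs P) :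
    (maskL cs lo hi).sum ≠ 0 := by
  have hPl : P.toNat < (maskL cs lo hi).length := by rw [length_maskL]; omega
  have hv : (maskL cs lo hi)[P.toNat] = cg cs P := by
    rw [getElem_maskL]
    rw [if_neg (by push_cast; omega)]
    congr 1
    omega
  have hmem : (maskL cs lo hi)[P.toNat] ∈ maskL cs lo hi := List.getElem_mem hPl
  have := List.single_le_sum (maskL_nonneg cs Hc lo hi) _ hmem
  rw [hv] at this
  omega

-- extending the window to the left end nc' = lo' + n (all strictly between are 0-cost)
theorem maskL_expand_left (cs : List Int) (lo hi lo' : Int)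
    (hlen : 0 < cs.length)
    (hlo' : -(cs.length : Int) < lo') (hlo'2 : lo' < lo) (hlo : lo ≤ 0)
    (hhi : 0 ≤ hi) (hhi2 : hi < (cs.length : Int)) (hnew : hi < lo' + (cs.length : Int))
    (hz : ∀ p : Int, lo' + (cs.length : Int) < p → p < lo + (cs.length : Int) → cg cs p = 0) :
    (maskL cs lo' hi).set (lo' + (cs.length : Int)).toNat (cg cs (lo' + (cs.length : Int)))
      = maskL cs lo hi := by
  apply List.ext_getElem (by simp [length_maskL])
  intro k h1 h2
  have h2' : k < cs.length := by rw [length_maskL] at h2; exact h2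
  have h1' : k < (maskL cs lo' hi).length := by rw [length_maskL]; exact h2'
  have hR : (maskL cs lo hi)[k] =
      if (k : Int) ≤ hi ∨ lo + (cs.length : Int) ≤ (k : Int) then 0 else cg cs (k : Int) :=
    getElem_maskL cs lo hi k h2
  have hL : (maskL cs lo' hi)[k] =
      if (k : Int) ≤ hi ∨ lo' + (cs.length : Int) ≤ (k : Int) then 0 else cg cs (k : Int) :=
    getElem_maskL cs lo' hi k h1'
  rw [List.getElem_set, hL, hR]
  split_ifs with he hw hw' hw'' <;>
    first
      | rfl
      | omega
      | (congr 1; omega)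
      | (exact (hz (k : Int) (by omega) (by omega)).symm)
      | (exact hz (k : Int) (by omega) (by omega))

-- extending the window to the right end hi' (all strictly between hi and hi' are 0-cost)
theorem maskL_expand_right (cs : List Int) (lo hi hi' : Int)
    (hlen : 0 < cs.length)
    (hlo : -(cs.length : Int) < lo) (hlo2 : lo ≤ 0)
    (hhi : 0 ≤ hi) (hhi2 : hi < hi') (hhi3 : hi' < lo + (cs.length : Int))
    (hhi4 : hi' < (cs.length : Int))
    (hz : ∀ p : Int, hi < p → p < hi' → cg cs p = 0) :
    (maskL cs lo hi').set hi'.toNat (cg cs hi') = maskL cs lo hi := by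
  apply List.ext_getElem (by simp [length_maskL])
  intro k h1 h2
  have h2' : k < cs.length := by rw [length_maskL] at h2; exact h2
  have h1' : k < (maskL cs lo hi').length := by rw [length_maskL]; exact h2'
  have hR : (maskL cs lo hi)[k] =
      if (k : Int) ≤ hi ∨ lo + (cs.length : Int) ≤ (k : Int) then 0 else cg cs (k : Int) :=
    getElem_maskL cs lo hi k h2
  have hL : (maskL cs lo hi')[k] =
      if (k : Int) ≤ hi' ∨ lo + (cs.length : Int) ≤ (k : Int) then 0 else cg cs (k : Int) :=
    getElem_maskL cs lo hi' k h1'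
  rw [List.getElem_set, hL, hR]
  split_ifs with he hw hw' hw'' <;>
    first
      | rfl
      | omega
      | (congr 1; omega)
      | (exact (hz (k : Int) (by omega) (by omega)).symm)
      | (exact hz (k : Int) (by omega) (by omega))

-- the initial graph: window [0,0] with cell 0 restored is the cost list itself
theorem maskL_init (cs : List Int) (hlen : 0 < cs.length) :
    (maskL cs 0 0).set 0 (cg cs 0) = cs := by
  apply List.ext_getElem (by simp [length_maskL])
  intro k h1 h2
  rw [List.getElem_set]
  split_ifs with he
  · subst he
    rw [show ((0 : Int)) = ((0 : Nat) : Int) from rfl, cg_getElem cs 0 h2]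
  · rw [getElem_maskL cs 0 0 k (by rw [length_maskL]; exact h2), if_neg (by omega),
      cg_getElem cs k h2]

theorem loopB_gt (idx : List Int) (n i j lo hi : Int) (atLo : Bool) (fB : Nat) (h : ¬ i ≤ j) :
    loopB idx n i j lo hi atLo 0 fB = 0 := by
  cases fB <;> simp [loopB, h]


theorem loopA_head_prep (cs : List Int) (lo hi now nc : Int)
    (h2 : now < cs.length) (h1 : -(cs.length : Int) ≤ now)
    (hnceq : nc = if now < 0 then now + (cs.length : Int) else now)
    (hwin : nc ≤ hi ∨ lo + (cs.length : Int) ≤ nc) :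
    PySem.List.pyGet? ((maskL cs lo hi).set nc.toNat (cg cs nc)) now = some (cg cs nc) ∧
    PySem.List.pySetD ((maskL cs lo hi).set nc.toNat (cg cs nc)) now 0 = maskL cs lo hi := by
  have hnc0 : 0 ≤ nc := by split_ifs at hnceq <;> omega
  have hncn : nc < (cs.length : Int) := by split_ifs at hnceq <;> omega
  have hGlen : ((maskL cs lo hi).set nc.toNat (cg cs nc)).length = cs.length := by
    simp [length_maskL]
  have htn : (if now < 0 then now + (((maskL cs lo hi).set nc.toNat (cg cs nc)).length : Int)
      else now) = nc := by rw [hGlen, hnceq]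
  have hncl : nc.toNat < (maskL cs lo hi).length := by rw [length_maskL]; omega
  have hmask0 : (maskL cs lo hi)[nc.toNat] = 0 := by
    rw [getElem_maskL, if_pos (by omega)]
  constructor
  · rw [pyGet?_cyc _ now (by rw [hGlen]; exact h1) (by rw [hGlen]; exact_mod_cast h2), htn]
    rw [List.getElem?_eq_getElem (by simpa [hGlen] using (by omega : nc.toNat < cs.length))]
    exact congrArg some (List.getElem_set_self (by simp [length_maskL]; omega))
  · rw [pySetD_cyc _ now 0 (by rw [hGlen]; exact h1) (by rw [hGlen]; exact_mod_cast h2), htn]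
    rw [List.set_set]
    exact set_eq_self_of _ _ _ hncl hmask0

theorem loopA_head_done (cs : List Int) (lo hi now nc ans : Int) (fa : Nat)
    (h2 : now < cs.length) (h1 : -(cs.length : Int) ≤ now)
    (hnceq : nc = if now < 0 then now + (cs.length : Int) else now)
    (hwin : nc ≤ hi ∨ lo + (cs.length : Int) ≤ nc)
    (hsum : (maskL cs lo hi).sum = 0) :
    loopA ((maskL cs lo hi).set nc.toNat (cg cs nc)) now ans (fa + 1) = ans + cg cs nc := by
  obtain ⟨hget, hset⟩ := loopA_head_prep cs lo hi now nc h2 h1 hnceq hwin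
  simp only [loopA, hget, hset, hsum]
  simp

theorem loopA_head_step (cs : List Int) (lo hi now nc ans : Int) (fa : Nat) (L R : Int)
    (h2 : now < cs.length) (h1 : -(cs.length : Int) ≤ now)
    (hnceq : nc = if now < 0 then now + (cs.length : Int) else now)
    (hwin : nc ≤ hi ∨ lo + (cs.length : Int) ≤ nc)
    (hsum : (maskL cs lo hi).sum ≠ 0)
    (hL : scanLA (maskL cs lo hi) now 1 (2 * (maskL cs lo hi).length + 2) = some L)
    (hR : scanRA (maskL cs lo hi) now 1 (2 * (maskL cs lo hi).length + 2) = some R) :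
    loopA ((maskL cs lo hi).set nc.toNat (cg cs nc)) now ans (fa + 1)
      = loopA (maskL cs lo hi) (now + (if L < R then -L else R)) (ans + cg cs nc + min L R) fa := by
  obtain ⟨hget, hset⟩ := loopA_head_prep cs lo hi now nc h2 h1 hnceq hwin
  simp only [loopA, hget, hset, if_neg hsum, hL, hR]

theorem maskL_get? (cs : List Int) (lo hi tc : Int) (h0 : 0 ≤ tc) (h1 : tc < (cs.length : Int)) :
    (maskL cs lo hi)[tc.toNat]? =
      some (if tc ≤ hi ∨ lo + (cs.length : Int) ≤ tc then 0 else cg cs tc) := by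
  have hl : tc.toNat < (maskL cs lo hi).length := by rw [length_maskL]; omega
  have e : ((tc.toNat : Nat) : Int) = tc := Int.toNat_of_nonneg h0
  rw [List.getElem?_eq_getElem hl, getElem_maskL, e]

theorem mainInv (cs idx : List Int)
    (Hc : ∀ x ∈ cs, 0 ≤ x)
    (Hmem : ∀ p : Int, p ∈ idx ↔ (1 ≤ p ∧ p < (cs.length : Int) ∧ 0 < cg cs p))
    (Hsort : idx.Pairwise (· < ·)) :
    ∀ (m : Nat) (i j lo hi now nc ans : Int) (atLo : Bool) (fA fB : Nat),
      m = (j + 1 - i).toNat → 0 ≤ i → i ≤ j + 1 → j < (idx.length : Int) →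
      -(cs.length : Int) < lo → lo ≤ 0 → 0 ≤ hi → hi < (cs.length : Int) →
      hi - lo ≤ (cs.length : Int) - 1 →
      now = (if atLo then lo else hi) →
      nc = (if now < 0 then now + (cs.length : Int) else now) →
      (∀ t : Nat, t < idx.length →
        ((i ≤ (t : Int) ∧ (t : Int) ≤ j) ↔
          (hi < idx.getD t 0 ∧ idx.getD t 0 < lo + (cs.length : Int)))) →
      m + 1 ≤ fA → m ≤ fB →
      loopA ((maskL cs lo hi).set nc.toNat (cg cs nc)) now ans fA
        = ans + cg cs nc + segSum cs idx i j
            + loopB idx (cs.length : Int) i j lo hi atLo 0 fB := by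
  intro m
  induction m with
  | zero =>
    intro i j lo hi now nc ans atLo fA fB hm h0i hij hjlen hlo1 hlo2 hhi1 hhi2 hwid
      hnoweq hnceq HR hfA hfB
    have hnow2 : now = lo ∨ now = hi := by cases atLo <;> simp [hnoweq]
    have hieq : i = j + 1 := by omega
    have hgd : ∀ (t : Nat), t < idx.length → idx.getD t 0 = idx[t]! := by
      intro t ht
      rw [List.getD_eq_getElem?_getD, List.getElem?_eq_getElem ht, Option.getD_some,
        getElem!_pos idx t ht]
    have hz : ∀ p : Int, hi < p → p < lo + (cs.length : Int) → cg cs p = 0 := by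
      intro p h1 h2
      by_cases h : cg cs p ≤ 0
      · have := cg_nonneg cs Hc p; omega
      · push_neg at h
        exfalso
        obtain ⟨t, ht, hte⟩ := List.getElem_of_mem ((Hmem p).mpr ⟨by omega, by omega, h⟩)
        have h3 := (HR t ht).mpr
          ⟨by rw [hgd t ht, getElem!_pos idx t ht, hte]; omega,
           by rw [hgd t ht, getElem!_pos idx t ht, hte]; omega⟩
        omega
    have hsum : (maskL cs lo hi).sum = 0 := maskL_sum_zero cs Hc lo hi hz
    cases fA with
    | zero => omega
    | succ fa =>
      rw [loopA_head_done cs lo hi now nc ans fa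
        (by rcases hnow2 with h | h <;> omega) (by rcases hnow2 with h | h <;> omega)
        hnceq (by rcases hnow2 with h | h <;> split_ifs at hnceq <;> omega) hsum]
      rw [loopB_gt idx _ i j lo hi atLo fB (by omega)]
      have hseg : segSum cs idx i j = 0 := by
        rw [segSum, show (j + 1 - i).toNat = 0 from by omega]
        simp
      rw [hseg]
      ring
  | succ m ih =>
    intro i j lo hi now nc ans atLo fA fB hm h0i hij hjlen hlo1 hlo2 hhi1 hhi2 hwid
      hnoweq hnceq HR hfA hfB
    have hnow2 : now = lo ∨ now = hi := by cases atLo <;> simp [hnoweq]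
    have hlen : 0 < cs.length := by omega
    have hij' : i ≤ j := by omega
    have h0j : 0 ≤ j := by omega
    have hiI : i.toNat < idx.length := by omega
    have hjI : j.toNat < idx.length := by omega
    have hgd : ∀ (t : Nat), t < idx.length → idx.getD t 0 = idx[t]! := by
      intro t ht
      rw [List.getD_eq_getElem?_getD, List.getElem?_eq_getElem ht, Option.getD_some,
        getElem!_pos idx t ht]
    have hlt : ∀ (a b : Nat), a < idx.length → b < idx.length → a < b →
        idx[a]! < idx[b]! := by
      intro a b ha hb hab
      rw [getElem!_pos idx a ha, getElem!_pos idx b hb]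
      exact List.pairwise_iff_getElem.mp Hsort a b ha hb hab
    have hIIe : idx.getD i.toNat 0 = idx[i.toNat]! := hgd i.toNat hiI
    have hJJe : idx.getD j.toNat 0 = idx[j.toNat]! := hgd j.toNat hjI
    have hIIb := (HR i.toNat hiI).mp ⟨by omega, by omega⟩
    have hJJb := (HR j.toNat hjI).mp ⟨by omega, by omega⟩
    have hIImem := (Hmem (idx.getD i.toNat 0)).mp
      (by rw [hIIe, getElem!_pos idx i.toNat hiI]; exact List.getElem_mem hiI)
    have hJJmem := (Hmem (idx.getD j.toNat 0)).mp
      (by rw [hJJe, getElem!_pos idx j.toNat hjI]; exact List.getElem_mem hjI)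
    have hIJle : idx.getD i.toNat 0 ≤ idx.getD j.toNat 0 := by
      by_cases h : i.toNat < j.toNat
      · have := hlt i.toNat j.toNat hiI hjI h
        omega
      · have heq : i.toNat = j.toNat := by omega
        rw [heq]
    -- below the segment minimum everything outside the window is zero-cost
    have hzlow : ∀ p : Int, hi < p → p < idx.getD i.toNat 0 → cg cs p = 0 := by
      intro p h1 h2
      by_cases h : cg cs p ≤ 0
      · have := cg_nonneg cs Hc p; omega
      · push_neg at h
        exfalso
        obtain ⟨t, ht, hte⟩ := List.getElem_of_mem ((Hmem p).mpr
          ⟨by omega, by omega, h⟩)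
        have hte' : idx.getD t 0 = p := by rw [hgd t ht, getElem!_pos idx t ht]; exact hte
        have h3 := (HR t ht).mpr ⟨by omega, by omega⟩
        have h4 : t < i.toNat ∨ t = i.toNat ∨ i.toNat < t := by omega
        rcases h4 with h4 | h4 | h4
        · omega
        · rw [h4] at hte'; omega
        · have := hlt i.toNat t hiI ht h4
          rw [← hIIe, ← hgd t ht] at this
          omega
    -- above the segment maximum everything outside the window is zero-cost
    have hzhigh : ∀ p : Int, idx.getD j.toNat 0 < p → p < lo + (cs.length : Int) →
        cg cs p = 0 := by
      intro p h1 h2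
      by_cases h : cg cs p ≤ 0
      · have := cg_nonneg cs Hc p; omega
      · push_neg at h
        exfalso
        obtain ⟨t, ht, hte⟩ := List.getElem_of_mem ((Hmem p).mpr
          ⟨by omega, by omega, h⟩)
        have hte' : idx.getD t 0 = p := by rw [hgd t ht, getElem!_pos idx t ht]; exact hte
        have h3 := (HR t ht).mpr ⟨by omega, by omega⟩
        have h4 : t < j.toNat ∨ t = j.toNat ∨ j.toNat < t := by omega
        rcases h4 with h4 | h4 | h4
        · have := hlt t j.toNat ht hjI h4
          rw [← hJJe, ← hgd t ht] at this
          omega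
        · rw [h4] at hte'; omega
        · omega
    have hsum : (maskL cs lo hi).sum ≠ 0 :=
      maskL_sum_ne cs Hc lo hi (idx.getD i.toNat 0) (by omega) (by omega) (by omega)
        hIImem.2.2
    have hnA : -(cs.length : Int) ≤ now := by rcases hnow2 with h | h <;> omega
    have hnB : now < (cs.length : Int) := by rcases hnow2 with h | h <;> omega
    have hnII : now < idx.getD i.toNat 0 := by rcases hnow2 with h | h <;> omega
    -- the right scan finds the segment minimum
    have hscanR : scanRA (maskL cs lo hi) now 1 (2 * (maskL cs lo hi).length + 2)
        = some (idx.getD i.toNat 0 - now) := by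
      apply scanRA_spec (maskL cs lo hi) now (idx.getD i.toNat 0 - now) _ 1 le_rfl (by omega)
      · intro q hq1 hq2
        have ht2 : now + q < (cs.length : Int) := by omega
        rw [pyGet?_cyc _ _ (by rw [length_maskL]; omega)
          (by rw [length_maskL]; exact ht2), length_maskL]
        by_cases hneg : now + q < 0
        · have hnl : now = lo := by rcases hnow2 with h | h <;> omega
          rw [if_pos hneg, maskL_get? cs lo hi _ (by omega) (by omega),
            if_pos (by omega)]
        · rw [if_neg hneg, maskL_get? cs lo hi _ (by omega) (by omega)]
          by_cases hw : now + q ≤ hi ∨ lo + (cs.length : Int) ≤ now + q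
          · rw [if_pos hw]
          · rw [if_neg hw, hzlow (now + q) (by omega) (by omega)]
      · refine ⟨cg cs (idx.getD i.toNat 0), ?_, by omega⟩
        rw [show now + (idx.getD i.toNat 0 - now) = idx.getD i.toNat 0 from by ring]
        rw [pyGet?_cyc _ _ (by rw [length_maskL]; omega) (by rw [length_maskL]; omega),
          length_maskL, if_neg (by omega), maskL_get? cs lo hi _ (by omega) (by omega),
          if_neg (by omega)]
      · rw [length_maskL]; omega
    -- the left scan finds the segment maximum (one lap around)
    have hscanL : scanLA (maskL cs lo hi) now 1 (2 * (maskL cs lo hi).length + 2)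
        = some (now + (cs.length : Int) - idx.getD j.toNat 0) := by
      apply scanLA_spec (maskL cs lo hi) now
        (now + (cs.length : Int) - idx.getD j.toNat 0) _ 1 le_rfl (by omega)
      · intro q hq1 hq2
        have ht2 : idx.getD j.toNat 0 - (cs.length : Int) < now - q := by omega
        rw [pyGet?_cyc _ _ (by rw [length_maskL]; omega)
          (by rw [length_maskL]; omega), length_maskL]
        by_cases hneg : now - q < 0
        · rw [if_pos hneg, maskL_get? cs lo hi _ (by omega) (by omega)]
          by_cases hw : now - q + (cs.length : Int) ≤ hi ∨
              lo + (cs.length : Int) ≤ now - q + (cs.length : Int)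
          · rw [if_pos hw]
          · rw [if_neg hw, hzhigh (now - q + (cs.length : Int)) (by omega) (by omega)]
        · have hnh : now = hi := by rcases hnow2 with h | h <;> omega
          rw [if_neg hneg, maskL_get? cs lo hi _ (by omega) (by omega),
            if_pos (by omega)]
      · refine ⟨cg cs (idx.getD j.toNat 0), ?_, by omega⟩
        rw [show now - (now + (cs.length : Int) - idx.getD j.toNat 0)
          = idx.getD j.toNat 0 - (cs.length : Int) from by ring]
        rw [pyGet?_cyc _ _ (by rw [length_maskL]; omega) (by rw [length_maskL]; omega),
          length_maskL, if_pos (by omega),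
          show idx.getD j.toNat 0 - (cs.length : Int) + (cs.length : Int)
            = idx.getD j.toNat 0 from by ring,
          maskL_get? cs lo hi _ (by omega) (by omega), if_neg (by omega)]
      · rw [length_maskL]; omega
    cases fA with
    | zero => omega
    | succ fa =>
    cases fB with
    | zero => omega
    | succ fb =>
    rw [loopA_head_step cs lo hi now nc ans fa
        (now + (cs.length : Int) - idx.getD j.toNat 0) (idx.getD i.toNat 0 - now)
        hnB hnA hnceq (by rcases hnow2 with h | h <;> split_ifs at hnceq <;> omega)
        hsum hscanL hscanR]
    have hBi : PySem.List.pyGetD idx i 0 = idx.getD i.toNat 0 := pyGetD_nonneg_cg idx i h0i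
    have hBj : PySem.List.pyGetD idx j 0 = idx.getD j.toNat 0 := pyGetD_nonneg_cg idx j h0j
    by_cases hLR : now + (cs.length : Int) - idx.getD j.toNat 0 < idx.getD i.toNat 0 - now
    · -- move left to the segment maximum
      rw [if_pos hLR, min_eq_left hLR.le]
      have hexp := maskL_expand_left cs lo hi (idx.getD j.toNat 0 - (cs.length : Int))
        hlen (by omega) (by omega) hlo2 hhi1 hhi2 (by omega)
        (by
          intro p hp1 hp2
          exact hzhigh p (by omega) hp2)
      rw [show idx.getD j.toNat 0 - (cs.length : Int) + (cs.length : Int)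
        = idx.getD j.toNat 0 from by ring] at hexp
      rw [show now + -(now + (cs.length : Int) - idx.getD j.toNat 0)
        = idx.getD j.toNat 0 - (cs.length : Int) from by ring]
      rw [← hexp]
      rw [ih i (j - 1) (idx.getD j.toNat 0 - (cs.length : Int)) hi
        (idx.getD j.toNat 0 - (cs.length : Int)) (idx.getD j.toNat 0)
        (ans + cg cs nc + (now + (cs.length : Int) - idx.getD j.toNat 0)) true fa fb
        (by omega) h0i (by omega) (by omega) (by omega) (by omega) hhi1 hhi2 (by omega)
        (by simp)
        (by rw [if_pos (by omega)]; ring)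
        (by
          intro t ht
          constructor
          · rintro ⟨ha, hb⟩
            have h5 := (HR t ht).mp ⟨ha, by omega⟩
            have h6 : idx.getD t 0 < idx.getD j.toNat 0 := by
              have h7 : t < j.toNat := by omega
              have := hlt t j.toNat ht hjI h7
              rw [hgd t ht, hJJe]
              exact this
            exact ⟨h5.1, by omega⟩
          · rintro ⟨ha, hb⟩
            have h8 := (HR t ht).mpr ⟨ha, by omega⟩
            have h9 : (t : Int) ≠ j := by
              intro he
              have h10 : t = j.toNat := by omega
              rw [hgd t ht, h10, ← hJJe] at hb
              omega
            exact ⟨h8.1, by omega⟩)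
        (by omega) (by omega)]
      have hBstep : loopB idx (cs.length : Int) i j lo hi atLo 0 (fb + 1)
          = (now + (cs.length : Int) - idx.getD j.toNat 0)
            + loopB idx (cs.length : Int) i (j - 1)
                (idx.getD j.toNat 0 - (cs.length : Int)) hi true 0 fb := by
        simp only [loopB, if_pos hij']
        rw [hBi, hBj, ← hnoweq, if_pos hLR, loopB_acc]
        ring
      rw [hBstep, segSum_back cs idx i j h0i hij' hjlen]
      ring
    · -- move right to the segment minimum
      rw [if_neg hLR, min_eq_right (by omega)]
      have hexp := maskL_expand_right cs lo hi (idx.getD i.toNat 0)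
        hlen hlo1 hlo2 hhi1 (by omega) (by omega) (by omega)
        (by
          intro p hp1 hp2
          exact hzlow p hp1 (by omega))
      rw [show now + (idx.getD i.toNat 0 - now) = idx.getD i.toNat 0 from by ring]
      rw [← hexp]
      rw [ih (i + 1) j lo (idx.getD i.toNat 0) (idx.getD i.toNat 0) (idx.getD i.toNat 0)
        (ans + cg cs nc + (idx.getD i.toNat 0 - now)) false fa fb
        (by omega) (by omega) (by omega) hjlen hlo1 hlo2 (by omega) (by omega) (by omega)
        (by simp)
        (by rw [if_neg (by omega)])
        (by
          intro t ht
          constructor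
          · rintro ⟨ha, hb⟩
            have h5 := (HR t ht).mp ⟨by omega, hb⟩
            have h6 : idx.getD i.toNat 0 < idx.getD t 0 := by
              have h7 : i.toNat < t := by omega
              have := hlt i.toNat t hiI ht h7
              rw [hgd t ht, hIIe]
              exact this
            exact ⟨h6, h5.2⟩
          · rintro ⟨ha, hb⟩
            have h8 := (HR t ht).mpr ⟨by omega, hb⟩
            have h9 : (t : Int) ≠ i := by
              intro he
              have h10 : t = i.toNat := by omega
              rw [hgd t ht, h10, ← hIIe] at ha
              omega
            exact ⟨by omega, h8.2⟩)
        (by omega) (by omega)]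
      have hBstep : loopB idx (cs.length : Int) i j lo hi atLo 0 (fb + 1)
          = (idx.getD i.toNat 0 - now)
            + loopB idx (cs.length : Int) (i + 1) j lo (idx.getD i.toNat 0) false 0 fb := by
        simp only [loopB, if_pos hij']
        rw [hBi, hBj, ← hnoweq, if_neg hLR, loopB_acc]
        ring
      rw [hBstep, segSum_front cs idx i j h0i hij' hjlen]
      ring

theorem costAB (ch : Char) : costA ch = costB ch := by
  rw [costA, costB, show (90 : Int) - (ch.toNat : Int) + 1 = 91 - (ch.toNat : Int) from by ring]

theorem costB_nonneg (ch : Char) : 0 ≤ costB ch := by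
  rw [costB]
  exact le_min (abs_nonneg _) (abs_nonneg _)

theorem filter_map_sum (P : Int → Bool) (f : Int → Int) :
    ∀ (l : List Int), (∀ x ∈ l, ¬ P x = true → f x = 0) →
      ((l.filter P).map f).sum = (l.map f).sum := by
  intro l
  induction l with
  | nil => intro _; rfl
  | cons a t iht =>
    intro h
    rw [List.filter_cons]
    by_cases hp : P a = true
    · rw [if_pos hp, List.map_cons, List.sum_cons, List.map_cons, List.sum_cons,
        iht (fun x hx => h x (List.mem_cons_of_mem a hx))]
    · rw [if_neg hp, List.map_cons, List.sum_cons, h a List.mem_cons_self hp,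
        iht (fun x hx => h x (List.mem_cons_of_mem a hx))]
      ring

theorem length_pyRange1 (n : Nat) :
    (PySem.List.pyRange 1 (n : Int) 1).length = n - 1 := by
  unfold PySem.List.pyRange
  rw [if_neg (by norm_num)]
  simp only [List.length_map, List.length_range]
  have e : ((n : Int) - 1 + 1 - 1) / 1 = (n : Int) - 1 := by omega
  rw [e]
  split_ifs <;> omega

theorem pyRange_map_cg (cs : List Int) :
    (PySem.List.pyRange 1 (cs.length : Int) 1).map (cg cs) = cs.drop 1 := by
  apply List.ext_getElem (by rw [List.length_map, length_pyRange1, List.length_drop])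
  intro k h1 h2
  rw [List.length_map, length_pyRange1] at h1
  have hget : (PySem.List.pyRange 1 (cs.length : Int) 1)[k]'(by rw [length_pyRange1]; omega)
      = 1 + 1 * (k : Int) := by
    unfold PySem.List.pyRange
    simp only [if_neg (by norm_num : ¬ (1 : Int) = 0), List.getElem_map, List.getElem_range]
  rw [List.getElem_map, hget, List.getElem_drop]
  have e : ((1 : Int) + 1 * (k : Int)) = ((1 + k : Nat) : Int) := by push_cast; ring
  rw [e, cg_getElem cs (1 + k) (by omega)]

theorem sum_head (cs : List Int) (h : 0 < cs.length) :
    cs.sum = cg cs 0 + (cs.drop 1).sum := by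
  cases cs with
  | nil => simp at h
  | cons a t => simp [cg]

theorem segSum_full (cs idx : List Int) :
    segSum cs idx 0 ((idx.length : Int) - 1) = (idx.map (cg cs)).sum := by
  rw [segSum]
  have e : ((idx.length : Int) - 1 + 1 - 0).toNat = idx.length := by omega
  rw [e, Int.toNat_zero, List.drop_zero, List.take_of_length_le (le_refl _)]

theorem solution_eq_alt (name : String) (h : name ≠ "") : solution name = solution_alt name := by
  have hmap : name.toList.map costA = name.toList.map costB :=
    List.map_congr_left (fun ch _ => costAB ch)
  have hlen : 0 < (name.toList.map costB).length := by
    rw [List.length_map]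
    cases hl : name.toList with
    | nil => exact absurd (String.toList_eq_nil_iff.mp hl) h
    | cons a t => simp
  rw [solution, solution_alt, hmap]
  set cs := name.toList.map costB with hcs
  set idx := (PySem.List.pyRange 1 (cs.length : Int) 1).filter
    (fun p => 0 < PySem.List.pyGetD cs p 0) with hidx
  have Hc : ∀ x ∈ cs, 0 ≤ x := by
    intro x hx
    obtain ⟨ch, _, he⟩ := List.mem_map.mp hx
    rw [← he]
    exact costB_nonneg ch
  have Hmem : ∀ p : Int, p ∈ idx ↔ (1 ≤ p ∧ p < (cs.length : Int) ∧ 0 < cg cs p) :=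
    mem_idxL cs
  have Hsort : idx.Pairwise (· < ·) := sorted_idxL cs
  have hidxlen : idx.length + 1 ≤ cs.length := length_idxL cs (by omega)
  have hinit : (maskL cs 0 0).set ((0 : Int)).toNat (cg cs 0) = cs := by
    simpa using maskL_init cs hlen
  have hmain := mainInv cs idx Hc Hmem Hsort idx.length 0 ((idx.length : Int) - 1) 0 0 0 0 0
    true (cs.length + 1) idx.length
    (by omega) (by omega) (by omega) (by omega) (by omega) (by omega) (by omega)
    (by omega) (by omega) (by simp) (by simp)
    (by
      intro t ht
      have hmem := (Hmem (idx.getD t 0)).mp (by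
        rw [List.getD_eq_getElem?_getD, List.getElem?_eq_getElem ht, Option.getD_some]
        exact List.getElem_mem ht)
      constructor
      · intro _
        exact ⟨by omega, by omega⟩
      · intro _
        exact ⟨by omega, by omega⟩)
    (by omega) (by omega)
  rw [hinit] at hmain
  rw [hmain]
  have hsum : cg cs 0 + segSum cs idx 0 ((idx.length : Int) - 1) = cs.sum := by
    rw [segSum_full, hidx, filter_map_sum _ _ _ (by
      intro x hx hnp
      have hx1 := PySem.List.mem_pyRange_one.mp hx
      have h2 : ¬ (0 < PySem.List.pyGetD cs x 0) := by simpa using hnp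
      rw [pyGetD_nonneg_cg cs x (by omega)] at h2
      have h3 := cg_nonneg cs Hc x
      omega)]
    rw [pyRange_map_cg, sum_head cs hlen]
  omega

-- ===== VERDICT (by name: the statement is the Claim_ definition above) =====
theorem solution_spec : Claim_equal_solution := by
  intro name _ hpre
  show solution name = solution_alt name
  exact solution_eq_alt name hpre
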